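-- pv_equiv track=rewrite | github.com/alcharkawimariam-Eng/AI-assistant-for-SkinCare-ingredient-compatibility | services/risk_engine/app/main.py | derive_product_role
-- ===== SOURCE A (Python) =====
-- from typing import List, Literal
--
-- def normalize(i: str) -> str:
--     return i.strip().lower()
--
-- def derive_product_role(ingredients: List[str]) -> str:
--     normalized = {normalize(i) for i in ingredients if i}
--
--     if {"avobenzone", "octocrylene", "homosalate", "octisalate", "zinc oxide", "titanium dioxide"} & normalized:
--         return "sunscreen"
--
--     if "retinol" in normalized:
--         return "retinoid treatment"
--
--     if {"glycolic acid", "salicylic acid", "lactic acid", "mandelic acid"} & normalized: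
--         return "exfoliant"
--
--     if {"hyaluronic acid", "sodium hyaluronate", "glycerin", "urea", "ceramide"} & normalized:
--         return "hydrator"
--
--     if {"niacinamide", "vitamin c", "ascorbic acid"} & normalized:
--         return "brightening treatment"
--
--     if "benzoyl peroxide" in normalized:
--         return "acne treatment"
--
--     return "general skincare product"
-- ===== SOURCE B (Python) =====
-- # Inverted index: one dict keyword -> (priority, role); a single pass over the
-- # ingredients keeps the best (lowest-priority) hit instead of testing rule sets in order.
-- KEYWORD_ROLE = {
--     "avobenzone": (0, "sunscreen"), "octocrylene": (0, "sunscreen"),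
--     "homosalate": (0, "sunscreen"), "octisalate": (0, "sunscreen"),
--     "zinc oxide": (0, "sunscreen"), "titanium dioxide": (0, "sunscreen"),
--     "retinol": (1, "retinoid treatment"),
--     "glycolic acid": (2, "exfoliant"), "salicylic acid": (2, "exfoliant"),
--     "lactic acid": (2, "exfoliant"), "mandelic acid": (2, "exfoliant"),
--     "hyaluronic acid": (3, "hydrator"), "sodium hyaluronate": (3, "hydrator"),
--     "glycerin": (3, "hydrator"), "urea": (3, "hydrator"), "ceramide": (3, "hydrator"),
--     "niacinamide": (4, "brightening treatment"), "vitamin c": (4, "brightening treatment"),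
--     "ascorbic acid": (4, "brightening treatment"),
--     "benzoyl peroxide": (5, "acne treatment"),
-- }
--
-- def derive_product_role(ingredients):
--     best = (6, "general skincare product")
--     for ing in ingredients:
--         hit = KEYWORD_ROLE.get(ing.strip().lower())
--         if hit is not None and hit[0] < best[0]:
--             best = hit
--     return best[1]
-- ===== Notes on version B (the rewrite author's own statement) =====
-- stated objective: alternative
-- what changed: Inverts the rule tables into a single keyword->(priority, role) index and replaces the chain of six set-intersection ifs by one fold over the ingredients that keeps the lowest-priority hit.
import Mathlib
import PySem

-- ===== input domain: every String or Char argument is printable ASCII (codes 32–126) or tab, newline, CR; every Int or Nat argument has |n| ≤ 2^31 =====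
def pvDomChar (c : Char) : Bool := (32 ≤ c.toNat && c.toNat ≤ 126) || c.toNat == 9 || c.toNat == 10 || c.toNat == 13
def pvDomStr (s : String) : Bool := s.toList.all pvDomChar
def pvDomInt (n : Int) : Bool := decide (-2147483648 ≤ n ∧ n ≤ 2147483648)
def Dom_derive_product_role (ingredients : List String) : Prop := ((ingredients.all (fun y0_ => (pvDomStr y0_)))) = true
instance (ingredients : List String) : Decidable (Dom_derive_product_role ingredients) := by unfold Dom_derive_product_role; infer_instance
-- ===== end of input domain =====

-- B inverts the six rule sets into one keyword -> (priority, role) index and replaces the chain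
-- of set-intersection ifs by a single fold keeping the lowest-priority hit (objective: alternative).

-- ===== PORT A =====
def normA (i : String) : String := PySem.Str.lower (PySem.Str.strip i)

def derive_product_role (ingredients : List String) : String :=
  let normalized : PySem.Set String :=
    PySem.Set.ofList ((ingredients.filter (fun i => !(i == ""))).map normA)
  if PySem.Set.inter (PySem.Set.ofList ["avobenzone", "octocrylene", "homosalate", "octisalate", "zinc oxide", "titanium dioxide"]) normalized ≠ [] then "sunscreen"
  else if normalized.contains "retinol" then "retinoid treatment"
  else if PySem.Set.inter (PySem.Set.ofList ["glycolic acid", "salicylic acid", "lactic acid", "mandelic acid"]) normalized ≠ [] then "exfoliant"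
  else if PySem.Set.inter (PySem.Set.ofList ["hyaluronic acid", "sodium hyaluronate", "glycerin", "urea", "ceramide"]) normalized ≠ [] then "hydrator"
  else if PySem.Set.inter (PySem.Set.ofList ["niacinamide", "vitamin c", "ascorbic acid"]) normalized ≠ [] then "brightening treatment"
  else if normalized.contains "benzoyl peroxide" then "acne treatment"
  else "general skincare product"


-- ===== PORT B =====
def KEYWORD_ROLE : PySem.Dict String (Int × String) := PySem.Dict.mk
  [("avobenzone", (0, "sunscreen")), ("octocrylene", (0, "sunscreen")),
   ("homosalate", (0, "sunscreen")), ("octisalate", (0, "sunscreen")),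
   ("zinc oxide", (0, "sunscreen")), ("titanium dioxide", (0, "sunscreen")),
   ("retinol", (1, "retinoid treatment")),
   ("glycolic acid", (2, "exfoliant")), ("salicylic acid", (2, "exfoliant")),
   ("lactic acid", (2, "exfoliant")), ("mandelic acid", (2, "exfoliant")),
   ("hyaluronic acid", (3, "hydrator")), ("sodium hyaluronate", (3, "hydrator")),
   ("glycerin", (3, "hydrator")), ("urea", (3, "hydrator")), ("ceramide", (3, "hydrator")),
   ("niacinamide", (4, "brightening treatment")), ("vitamin c", (4, "brightening treatment")),
   ("ascorbic acid", (4, "brightening treatment")),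
   ("benzoyl peroxide", (5, "acne treatment"))]

-- the loop body of Source B ('hit = KEYWORD_ROLE.get(...); if hit is not None and hit[0] < best[0]: best = hit'), named
def stepB (best : Int × String) (ing : String) : Int × String :=
  match PySem.Dict.get? KEYWORD_ROLE (PySem.Str.lower (PySem.Str.strip ing)) with
  | some hit => if hit.1 < best.1 then hit else best
  | none => best

def derive_product_role_alt (ingredients : List String) : String :=
  (ingredients.foldl stepB ((6 : Int), "general skincare product")).2

-- ===== PRECONDITION & SPEC =====
def Spec_derive_product_role (ingredients : List String) (out : String) : Prop := out = derive_product_role_alt ingredients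
instance (ingredients : List String) (out : String) : Decidable (Spec_derive_product_role ingredients out) := by unfold Spec_derive_product_role; infer_instance

-- ===== CLAIM (what is proved, stated in full; the proofs are below) =====
def Claim_equal_derive_product_role : Prop := ∀ (ingredients : List String), Dom_derive_product_role ingredients → Spec_derive_product_role ingredients (derive_product_role ingredients)

-- ===== LEMMAS AND PROOFS =====

-- priority of a (normalized) string in B's index; 6 = not a keyword
def pr (s : String) : Int := ((PySem.Dict.get? KEYWORD_ROLE s).map Prod.fst).getD 6

-- role name of each priority
def nm (p : Int) : String :=
  if p = 0 then "sunscreen" else if p = 1 then "retinoid treatment"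
  else if p = 2 then "exfoliant" else if p = 3 then "hydrator"
  else if p = 4 then "brightening treatment" else if p = 5 then "acne treatment"
  else "general skincare product"

lemma norm_empty : normA "" = "" := rfl

-- a dict lookup either misses or returns a value paired with the key in the items list
lemma get?_mem_items {κ ν : Type} [BEq κ] [LawfulBEq κ] (d : PySem.Dict κ ν) (s : κ) :
    PySem.Dict.get? d s = none ∨ ∃ v, PySem.Dict.get? d s = some v ∧ (s, v) ∈ d.items := by
  unfold PySem.Dict.get?
  cases hfind : List.find? (fun p => p.1 == s) d.items with
  | none => exact Or.inl rfl
  | some p =>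
    right
    refine ⟨p.2, rfl, ?_⟩
    have hmem := List.mem_of_find?_eq_some hfind
    have hp := List.find?_some hfind
    have : p.1 = s := by simpa using hp
    rw [← this]; exact hmem

lemma dict_cases (s : String) :
    (PySem.Dict.get? KEYWORD_ROLE s = none ∧ pr s = 6) ∨
    (PySem.Dict.get? KEYWORD_ROLE s = some (pr s, nm (pr s)) ∧ 0 ≤ pr s ∧ pr s < 6) := by
  rcases get?_mem_items KEYWORD_ROLE s with h | ⟨v, h, hmem⟩
  · exact Or.inl ⟨h, by simp [pr, h]⟩
  · right
    have hpr : pr s = v.1 := by simp [pr, h]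
    have hv : v.2 = nm v.1 ∧ 0 ≤ v.1 ∧ v.1 < 6 := by
      have : ∀ p ∈ KEYWORD_ROLE.items, p.2.2 = nm p.2.1 ∧ 0 ≤ p.2.1 ∧ p.2.1 < 6 := by decide
      exact this (s, v) hmem
    obtain ⟨hnm, hb1, hb2⟩ := hv
    refine ⟨?_, ?_, ?_⟩
    · rw [h, hpr, ← hnm]
    · omega
    · omega

lemma pr_bounds (s : String) : 0 ≤ pr s ∧ pr s ≤ 6 := by
  rcases dict_cases s with ⟨-, h⟩ | ⟨-, h1, h2⟩ <;> omega

lemma key_of_pr (s : String) (k : Int) (hk : k ≠ 6) (h : pr s = k) :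
    ∃ v, PySem.Dict.get? KEYWORD_ROLE s = some v ∧ v.1 = k ∧ (s, v) ∈ KEYWORD_ROLE.items := by
  rcases get?_mem_items KEYWORD_ROLE s with h0 | ⟨v, h0, hmem⟩
  · exfalso; apply hk; rw [← h]; simp [pr, h0]
  · refine ⟨v, h0, ?_, hmem⟩; simp [pr, h0] at h; omega

-- membership in each rule's key list ↔ pr takes that rule's priority
lemma mem_pr_0 (s : String) : s ∈ (["avobenzone", "octocrylene", "homosalate", "octisalate", "zinc oxide", "titanium dioxide"] : List String) ↔ pr s = 0 := by
  constructor
  · intro h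
    simp only [List.mem_cons, List.not_mem_nil, or_false] at h
    rcases h with rfl | rfl | rfl | rfl | rfl | rfl <;> decide
  · intro h
    obtain ⟨v, hv, hv1, hmem⟩ := key_of_pr s 0 (by norm_num) h
    have : ∀ p ∈ KEYWORD_ROLE.items, p.2.1 = 0 → p.1 ∈ (["avobenzone", "octocrylene", "homosalate", "octisalate", "zinc oxide", "titanium dioxide"] : List String) := by decide
    exact this (s, v) hmem hv1

lemma mem_pr_1 (s : String) : s ∈ (["retinol"] : List String) ↔ pr s = 1 := by
  constructor
  · intro h
    simp only [List.mem_cons, List.not_mem_nil, or_false] at h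
    rcases h with rfl <;> decide
  · intro h
    obtain ⟨v, hv, hv1, hmem⟩ := key_of_pr s 1 (by norm_num) h
    have : ∀ p ∈ KEYWORD_ROLE.items, p.2.1 = 1 → p.1 ∈ (["retinol"] : List String) := by decide
    exact this (s, v) hmem hv1

lemma mem_pr_2 (s : String) : s ∈ (["glycolic acid", "salicylic acid", "lactic acid", "mandelic acid"] : List String) ↔ pr s = 2 := by
  constructor
  · intro h
    simp only [List.mem_cons, List.not_mem_nil, or_false] at h
    rcases h with rfl | rfl | rfl | rfl <;> decide
  · intro h
    obtain ⟨v, hv, hv1, hmem⟩ := key_of_pr s 2 (by norm_num) h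
    have : ∀ p ∈ KEYWORD_ROLE.items, p.2.1 = 2 → p.1 ∈ (["glycolic acid", "salicylic acid", "lactic acid", "mandelic acid"] : List String) := by decide
    exact this (s, v) hmem hv1

lemma mem_pr_3 (s : String) : s ∈ (["hyaluronic acid", "sodium hyaluronate", "glycerin", "urea", "ceramide"] : List String) ↔ pr s = 3 := by
  constructor
  · intro h
    simp only [List.mem_cons, List.not_mem_nil, or_false] at h
    rcases h with rfl | rfl | rfl | rfl | rfl <;> decide
  · intro h
    obtain ⟨v, hv, hv1, hmem⟩ := key_of_pr s 3 (by norm_num) h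
    have : ∀ p ∈ KEYWORD_ROLE.items, p.2.1 = 3 → p.1 ∈ (["hyaluronic acid", "sodium hyaluronate", "glycerin", "urea", "ceramide"] : List String) := by decide
    exact this (s, v) hmem hv1

lemma mem_pr_4 (s : String) : s ∈ (["niacinamide", "vitamin c", "ascorbic acid"] : List String) ↔ pr s = 4 := by
  constructor
  · intro h
    simp only [List.mem_cons, List.not_mem_nil, or_false] at h
    rcases h with rfl | rfl | rfl <;> decide
  · intro h
    obtain ⟨v, hv, hv1, hmem⟩ := key_of_pr s 4 (by norm_num) h
    have : ∀ p ∈ KEYWORD_ROLE.items, p.2.1 = 4 → p.1 ∈ (["niacinamide", "vitamin c", "ascorbic acid"] : List String) := by decide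
    exact this (s, v) hmem hv1

lemma mem_pr_5 (s : String) : s ∈ (["benzoyl peroxide"] : List String) ↔ pr s = 5 := by
  constructor
  · intro h
    simp only [List.mem_cons, List.not_mem_nil, or_false] at h
    rcases h with rfl <;> decide
  · intro h
    obtain ⟨v, hv, hv1, hmem⟩ := key_of_pr s 5 (by norm_num) h
    have : ∀ p ∈ KEYWORD_ROLE.items, p.2.1 = 5 → p.1 ∈ (["benzoyl peroxide"] : List String) := by decide
    exact this (s, v) hmem hv1

-- elements of the normalized set = normalizations of the nonempty ingredients (any target ≠ "")
lemma norm_mem (ing : List String) (k : String) (hk : k ≠ "") :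
    k ∈ PySem.Set.ofList ((ing.filter (fun i => !(i == ""))).map normA) ↔ ∃ i ∈ ing, normA i = k := by
  rw [PySem.Set.mem_ofList, List.mem_map]
  constructor
  · rintro ⟨i, hi, rfl⟩; exact ⟨i, (List.mem_filter.1 hi).1, rfl⟩
  · rintro ⟨i, hi, hik⟩
    refine ⟨i, List.mem_filter.2 ⟨hi, ?_⟩, hik⟩
    have : i ≠ "" := by rintro rfl; exact hk (norm_empty ▸ hik.symm)
    simpa using this

lemma contains_cond (k : String) (ing : List String) (hk : k ≠ "") :
    ((PySem.Set.ofList ((ing.filter (fun i => !(i == ""))).map normA)).contains k = true) ↔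
    (∃ i ∈ ing, normA i = k) := by
  rw [PySem.Set.contains_iff, norm_mem ing k hk]

lemma inter_cond (keys ing : List String) (hk : "" ∉ keys) :
    (PySem.Set.inter (PySem.Set.ofList keys) (PySem.Set.ofList ((ing.filter (fun i => !(i == ""))).map normA)) ≠ []) ↔
    (∃ i ∈ ing, normA i ∈ keys) := by
  rw [ne_eq, List.eq_nil_iff_forall_not_mem]
  push Not
  constructor
  · rintro ⟨x, hx⟩
    have hx' := (PySem.Set.mem_inter _ _ _).1 hx
    obtain ⟨i, hi, rfl⟩ := (norm_mem ing x (by rintro rfl; exact hk ((PySem.Set.mem_ofList _ _).1 hx'.1))).1 hx'.2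
    exact ⟨i, hi, (PySem.Set.mem_ofList _ _).1 hx'.1⟩
  · rintro ⟨i, hi, hmem⟩
    refine ⟨normA i, (PySem.Set.mem_inter _ _ _).2 ⟨(PySem.Set.mem_ofList _ _).2 hmem, ?_⟩⟩
    exact (norm_mem ing (normA i) (by rintro h; exact hk (h ▸ hmem))).2 ⟨i, hi, rfl⟩

lemma step_eq (p : Int) (ing : String) (hp : p ≤ 6) :
    stepB (p, nm p) ing = (min p (pr (PySem.Str.lower (PySem.Str.strip ing))),
      nm (min p (pr (PySem.Str.lower (PySem.Str.strip ing))))) := by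
  simp only [stepB]
  rcases dict_cases (PySem.Str.lower (PySem.Str.strip ing)) with ⟨hnone, hpr⟩ | ⟨hsome, h0, h6⟩
  · rw [hnone, show min p (pr (PySem.Str.lower (PySem.Str.strip ing))) = p from by rw [hpr]; exact min_eq_left hp]
  · rw [hsome]
    show (if (pr (PySem.Str.lower (PySem.Str.strip ing)), nm (pr (PySem.Str.lower (PySem.Str.strip ing)))).1 < (p, nm p).1
      then (pr (PySem.Str.lower (PySem.Str.strip ing)), nm (pr (PySem.Str.lower (PySem.Str.strip ing)))) else (p, nm p)) = _
    split
    · next hlt => rw [min_eq_right (le_of_lt hlt)]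
    · next hlt => rw [min_eq_left (not_lt.1 hlt)]

-- B's fold carries (p, nm p) and computes the running minimum of priorities
lemma fold_spec (l : List String) : ∀ p : Int, p ≤ 6 →
    l.foldl stepB (p, nm p)
    = (l.foldl (fun a i => min a (pr (PySem.Str.lower (PySem.Str.strip i)))) p,
       nm (l.foldl (fun a i => min a (pr (PySem.Str.lower (PySem.Str.strip i)))) p)) := by
  induction l with
  | nil => intro p _; rfl
  | cons i l ih =>
    intro p hp
    simp only [List.foldl_cons]
    rw [step_eq p i hp]
    exact ih _ (le_trans (min_le_left _ _) hp)

lemma foldl_min_le (f : String → Int) (l : List String) (p : Int) :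
    l.foldl (fun a i => min a (f i)) p ≤ p ∧
    ∀ i ∈ l, l.foldl (fun a i => min a (f i)) p ≤ f i := by
  induction l generalizing p with
  | nil => exact ⟨le_refl _, by simp⟩
  | cons j l ih =>
    obtain ⟨h1, h2⟩ := ih (min p (f j))
    refine ⟨le_trans h1 (min_le_left _ _), ?_⟩
    intro i hi
    rcases List.mem_cons.1 hi with rfl | hi
    · exact le_trans h1 (min_le_right _ _)
    · exact h2 i hi

lemma foldl_min_attained (f : String → Int) (l : List String) (p : Int) :
    l.foldl (fun a i => min a (f i)) p = p ∨
    ∃ i ∈ l, l.foldl (fun a i => min a (f i)) p = f i := by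
  induction l generalizing p with
  | nil => exact Or.inl rfl
  | cons j l ih =>
    simp only [List.foldl_cons]
    rcases ih (min p (f j)) with h | ⟨i, hi, h⟩
    · by_cases hle : p ≤ f j
      · left; rw [h]; exact min_eq_left hle
      · right; exact ⟨j, List.mem_cons_self, by rw [h]; exact min_eq_right (le_of_not_ge hle)⟩
    · right; exact ⟨i, List.mem_cons_of_mem _ hi, h⟩

-- ===== VERDICT (by name: the statement is the Claim_ definition above) =====
theorem derive_product_role_spec : Claim_equal_derive_product_role := by
  intro ing _
  show derive_product_role ing = derive_product_role_alt ing
  have hB : derive_product_role_alt ing = nm (ing.foldl (fun a i => min a (pr (PySem.Str.lower (PySem.Str.strip i)))) 6) := by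
    unfold derive_product_role_alt
    rw [show ((6 : Int), "general skincare product") = ((6 : Int), nm 6) from rfl,
      fold_spec ing 6 (le_refl _)]
  obtain ⟨hle6, hlei⟩ := foldl_min_le (fun i => pr (PySem.Str.lower (PySem.Str.strip i))) ing 6
  have hatt := foldl_min_attained (fun i => pr (PySem.Str.lower (PySem.Str.strip i))) ing 6
  have hprb : ∀ i : String, 0 ≤ pr (PySem.Str.lower (PySem.Str.strip i)) :=
    fun i => (pr_bounds (PySem.Str.lower (PySem.Str.strip i))).1
  simp only at hle6 hlei hatt
  set m := ing.foldl (fun a i => min a (pr (PySem.Str.lower (PySem.Str.strip i)))) 6 with hm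
  rw [hB]
  have h1 := (inter_cond ["avobenzone", "octocrylene", "homosalate", "octisalate", "zinc oxide", "titanium dioxide"] ing (by decide)).trans
    (exists_congr fun i => and_congr_right fun _ => mem_pr_0 (PySem.Str.lower (PySem.Str.strip i)))
  have h2 := (contains_cond "retinol" ing (by decide)).trans
    (exists_congr fun i => and_congr_right fun _ =>
      (List.mem_singleton (a := PySem.Str.lower (PySem.Str.strip i))).symm.trans (mem_pr_1 (PySem.Str.lower (PySem.Str.strip i))))
  have h3 := (inter_cond ["glycolic acid", "salicylic acid", "lactic acid", "mandelic acid"] ing (by decide)).trans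
    (exists_congr fun i => and_congr_right fun _ => mem_pr_2 (PySem.Str.lower (PySem.Str.strip i)))
  have h4 := (inter_cond ["hyaluronic acid", "sodium hyaluronate", "glycerin", "urea", "ceramide"] ing (by decide)).trans
    (exists_congr fun i => and_congr_right fun _ => mem_pr_3 (PySem.Str.lower (PySem.Str.strip i)))
  have h5 := (inter_cond ["niacinamide", "vitamin c", "ascorbic acid"] ing (by decide)).trans
    (exists_congr fun i => and_congr_right fun _ => mem_pr_4 (PySem.Str.lower (PySem.Str.strip i)))
  have h6 := (contains_cond "benzoyl peroxide" ing (by decide)).trans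
    (exists_congr fun i => and_congr_right fun _ =>
      (List.mem_singleton (a := PySem.Str.lower (PySem.Str.strip i))).symm.trans (mem_pr_5 (PySem.Str.lower (PySem.Str.strip i))))
  simp only [derive_product_role]
  split_ifs with c1 c2 c3 c4 c5 c6
  · obtain ⟨i, hi, hp⟩ := h1.1 c1
    have hub := hlei i hi; rw [hp] at hub
    have hmk : m = 0 := by
      rcases hatt with h | ⟨j, hj, hpj⟩
      · omega
      · have hb := hprb j; rw [← hpj] at hb
        omega
    rw [hmk]; rfl
  · obtain ⟨i, hi, hp⟩ := h2.1 c2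
    have hub := hlei i hi; rw [hp] at hub
    have hmk : m = 1 := by
      rcases hatt with h | ⟨j, hj, hpj⟩
      · omega
      · have hb := hprb j; rw [← hpj] at hb
        have e0 : m ≠ 0 := fun h0 => c1 (h1.2 ⟨j, hj, hpj.symm.trans h0⟩)
        omega
    rw [hmk]; rfl
  · obtain ⟨i, hi, hp⟩ := h3.1 c3
    have hub := hlei i hi; rw [hp] at hub
    have hmk : m = 2 := by
      rcases hatt with h | ⟨j, hj, hpj⟩
      · omega
      · have hb := hprb j; rw [← hpj] at hb
        have e0 : m ≠ 0 := fun h0 => c1 (h1.2 ⟨j, hj, hpj.symm.trans h0⟩)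
        have e1 : m ≠ 1 := fun h0 => c2 (h2.2 ⟨j, hj, hpj.symm.trans h0⟩)
        omega
    rw [hmk]; rfl
  · obtain ⟨i, hi, hp⟩ := h4.1 c4
    have hub := hlei i hi; rw [hp] at hub
    have hmk : m = 3 := by
      rcases hatt with h | ⟨j, hj, hpj⟩
      · omega
      · have hb := hprb j; rw [← hpj] at hb
        have e0 : m ≠ 0 := fun h0 => c1 (h1.2 ⟨j, hj, hpj.symm.trans h0⟩)
        have e1 : m ≠ 1 := fun h0 => c2 (h2.2 ⟨j, hj, hpj.symm.trans h0⟩)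
        have e2 : m ≠ 2 := fun h0 => c3 (h3.2 ⟨j, hj, hpj.symm.trans h0⟩)
        omega
    rw [hmk]; rfl
  · obtain ⟨i, hi, hp⟩ := h5.1 c5
    have hub := hlei i hi; rw [hp] at hub
    have hmk : m = 4 := by
      rcases hatt with h | ⟨j, hj, hpj⟩
      · omega
      · have hb := hprb j; rw [← hpj] at hb
        have e0 : m ≠ 0 := fun h0 => c1 (h1.2 ⟨j, hj, hpj.symm.trans h0⟩)
        have e1 : m ≠ 1 := fun h0 => c2 (h2.2 ⟨j, hj, hpj.symm.trans h0⟩)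
        have e2 : m ≠ 2 := fun h0 => c3 (h3.2 ⟨j, hj, hpj.symm.trans h0⟩)
        have e3 : m ≠ 3 := fun h0 => c4 (h4.2 ⟨j, hj, hpj.symm.trans h0⟩)
        omega
    rw [hmk]; rfl
  · obtain ⟨i, hi, hp⟩ := h6.1 c6
    have hub := hlei i hi; rw [hp] at hub
    have hmk : m = 5 := by
      rcases hatt with h | ⟨j, hj, hpj⟩
      · omega
      · have hb := hprb j; rw [← hpj] at hb
        have e0 : m ≠ 0 := fun h0 => c1 (h1.2 ⟨j, hj, hpj.symm.trans h0⟩)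
        have e1 : m ≠ 1 := fun h0 => c2 (h2.2 ⟨j, hj, hpj.symm.trans h0⟩)
        have e2 : m ≠ 2 := fun h0 => c3 (h3.2 ⟨j, hj, hpj.symm.trans h0⟩)
        have e3 : m ≠ 3 := fun h0 => c4 (h4.2 ⟨j, hj, hpj.symm.trans h0⟩)
        have e4 : m ≠ 4 := fun h0 => c5 (h5.2 ⟨j, hj, hpj.symm.trans h0⟩)
        omega
    rw [hmk]; rfl
  · have hmk : m = 6 := by
      rcases hatt with h | ⟨j, hj, hpj⟩
      · exact h
      · have hb := pr_bounds (PySem.Str.lower (PySem.Str.strip j))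
        rw [← hpj] at hb
        have e0 : m ≠ 0 := fun h0 => c1 (h1.2 ⟨j, hj, hpj.symm.trans h0⟩)
        have e1 : m ≠ 1 := fun h0 => c2 (h2.2 ⟨j, hj, hpj.symm.trans h0⟩)
        have e2 : m ≠ 2 := fun h0 => c3 (h3.2 ⟨j, hj, hpj.symm.trans h0⟩)
        have e3 : m ≠ 3 := fun h0 => c4 (h4.2 ⟨j, hj, hpj.symm.trans h0⟩)
        have e4 : m ≠ 4 := fun h0 => c5 (h5.2 ⟨j, hj, hpj.symm.trans h0⟩)
        have e5 : m ≠ 5 := fun h0 => c6 (h6.2 ⟨j, hj, hpj.symm.trans h0⟩)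
        omega
    rw [hmk]; rfl
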